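-- pv_equiv track=rewrite | github.com/fogleman/Gravity | util.py | sum_coords
-- ===== SOURCE A (Python) =====
-- def sum_coords(coords):
--     if coords:
--         x = sum(x for x, y in coords)
--         y = sum(y for x, y in coords)
--     else:
--         x = 0
--         y = 0
--     return (x, y)
-- ===== SOURCE B (Python) =====
-- def sum_coords(coords):
--     x = 0
--     y = 0
--     for cx, cy in coords:
--         x += cx
--         y += cy
--     return (x, y)
-- ===== Notes on version B (the rewrite author's own statement) =====
-- stated objective: simpler
-- what changed: Two separate generator-sum passes plus an explicit empty-list guard are replaced by one loop maintaining both running totals, with zero-initialized accumulators making the guard unnecessary.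
import Mathlib
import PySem

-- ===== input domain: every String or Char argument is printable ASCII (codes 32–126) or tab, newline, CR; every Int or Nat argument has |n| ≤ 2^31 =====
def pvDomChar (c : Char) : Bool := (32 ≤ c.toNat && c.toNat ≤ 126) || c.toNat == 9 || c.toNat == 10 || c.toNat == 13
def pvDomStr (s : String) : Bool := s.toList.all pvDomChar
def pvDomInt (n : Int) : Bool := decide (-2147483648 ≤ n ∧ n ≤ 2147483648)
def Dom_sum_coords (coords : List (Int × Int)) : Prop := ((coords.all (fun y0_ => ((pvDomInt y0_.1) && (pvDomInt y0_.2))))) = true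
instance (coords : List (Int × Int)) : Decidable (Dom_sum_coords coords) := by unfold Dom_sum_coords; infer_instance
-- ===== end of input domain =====

-- B replaces A's two generator-sum passes and empty-list guard with one loop keeping both running totals (objective: simpler).

-- ===== PORT A =====
def sum_coords (coords : List (Int × Int)) : Int × Int :=
  if coords ≠ [] then
    -- x = sum(x for x, y in coords); y = sum(y for x, y in coords)
    let x := (coords.map (fun p => p.1)).foldl (· + ·) 0
    let y := (coords.map (fun p => p.2)).foldl (· + ·) 0
    (x, y)
  else
    (0, 0)

-- ===== PORT B =====
def sum_coords_alt (coords : List (Int × Int)) : Int × Int :=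
  -- x = 0; y = 0; for cx, cy in coords: x += cx; y += cy
  coords.foldl (fun (acc : Int × Int) p => (acc.1 + p.1, acc.2 + p.2)) (0, 0)

-- ===== PRECONDITION & SPEC =====
def Spec_sum_coords (coords : List (Int × Int)) (out : Int × Int) : Prop := out = sum_coords_alt coords
instance (coords : List (Int × Int)) (out : Int × Int) : Decidable (Spec_sum_coords coords out) := by unfold Spec_sum_coords; infer_instance

-- ===== CLAIM (what is proved, stated in full; the proofs are below) =====
def Claim_equal_sum_coords : Prop := ∀ (coords : List (Int × Int)), Dom_sum_coords coords → Spec_sum_coords coords (sum_coords coords)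

-- ===== LEMMAS AND PROOFS =====
theorem foldl_add_shift (l : List Int) (a : Int) :
    l.foldl (· + ·) a = a + l.foldl (· + ·) 0 := by
  induction l generalizing a with
  | nil => simp
  | cons h t ih =>
    simp only [List.foldl]
    rw [ih (a + h), ih (0 + h)]
    ring

theorem alt_foldl (coords : List (Int × Int)) (a b : Int) :
    coords.foldl (fun (acc : Int × Int) p => (acc.1 + p.1, acc.2 + p.2)) (a, b)
      = (a + (coords.map (fun p => p.1)).foldl (· + ·) 0,
         b + (coords.map (fun p => p.2)).foldl (· + ·) 0) := by
  induction coords generalizing a b with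
  | nil => simp
  | cons h t ih =>
    simp only [List.foldl, List.map]
    rw [ih, foldl_add_shift (t.map (fun p => p.1)) (0 + h.1),
        foldl_add_shift (t.map (fun p => p.2)) (0 + h.2)]
    simp [Prod.ext_iff]; constructor <;> ring

-- ===== VERDICT (by name: the statement is the Claim_ definition above) =====
theorem sum_coords_spec : Claim_equal_sum_coords := by
  intro coords _
  unfold Spec_sum_coords sum_coords sum_coords_alt
  cases coords with
  | nil => simp
  | cons h t =>
    rw [alt_foldl]
    simp
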